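-- pv_equiv track=rewrite | github.com/ericmerle3789/Collatz-Junction-Theorem | research_log/R159_character_sums.py | find_good_primes
-- ===== SOURCE A (Python) =====
-- from collections import defaultdict
--
-- def ord_p_2(p):
--     """Compute ord_p(2) = smallest r such that 2^r = 1 mod p."""
--     r = 1
--     val = 2 % p
--     while val != 1:
--         val = (val * 2) % p
--         r += 1
--         if r > p:
--             return p - 1  # fallback
--     return r
--
-- def is_prime(n):
--     if n < 2: return False
--     if n < 4: return True
--     if n % 2 == 0 or n % 3 == 0: return False
--     i = 5
--     while i * i <= n:
--         if n % i == 0 or n % (i + 2) == 0: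
--             return False
--         i += 6
--     return True
--
-- def find_good_primes(max_p=200000, max_count=200):
--     """Find primes with various orders of 2, collecting a diverse set."""
--     primes_by_order = defaultdict(list)
--     for p in range(3, max_p, 2):
--         if not is_prime(p):
--             continue
--         r = ord_p_2(p)
--         if 8 <= r <= 120:
--             primes_by_order[r].append(p)
--             if sum(len(v) for v in primes_by_order.values()) >= max_count:
--                 break
--     return primes_by_order
-- ===== SOURCE B (Python) =====
-- def _is_prime(n):
--     if n < 2:
--         return False
--     if n % 2 == 0:
--         return n == 2
--     d = 3
--     while d * d <= n:
--         if n % d == 0: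
--             return False
--         d += 2
--     return True
--
-- def _capped_ord2(p):
--     """Order of 2 mod p if it is <= 120, else None (larger orders are never used)."""
--     val = 2 % p
--     for r in range(1, 121):
--         if val == 1:
--             return r
--         val = val * 2 % p
--     return None
--
-- def find_good_primes(max_p=200000, max_count=200):
--     """Find primes with various orders of 2, collecting a diverse set."""
--     primes_by_order = {}
--     count = 0
--     for p in range(3, max_p, 2):
--         if not _is_prime(p):
--             continue
--         r = _capped_ord2(p)
--         if r is not None and r >= 8:
--             primes_by_order[r] = primes_by_order.get(r, []) + [p]
--             count += 1
--             if count >= max_count: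
--                 break
--     return primes_by_order
-- ===== Notes on version B (the rewrite author's own statement) =====
-- stated objective: faster
-- what changed: B caps the order-of-2 doubling loop at 120 iterations (orders above 120 are discarded anyway, so the unbounded O(p) scan per prime disappears), keeps a running count of collected primes instead of re-summing all dict values after every append, and uses a plain odd-step trial division instead of the 6k±1 wheel.
import Mathlib
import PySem

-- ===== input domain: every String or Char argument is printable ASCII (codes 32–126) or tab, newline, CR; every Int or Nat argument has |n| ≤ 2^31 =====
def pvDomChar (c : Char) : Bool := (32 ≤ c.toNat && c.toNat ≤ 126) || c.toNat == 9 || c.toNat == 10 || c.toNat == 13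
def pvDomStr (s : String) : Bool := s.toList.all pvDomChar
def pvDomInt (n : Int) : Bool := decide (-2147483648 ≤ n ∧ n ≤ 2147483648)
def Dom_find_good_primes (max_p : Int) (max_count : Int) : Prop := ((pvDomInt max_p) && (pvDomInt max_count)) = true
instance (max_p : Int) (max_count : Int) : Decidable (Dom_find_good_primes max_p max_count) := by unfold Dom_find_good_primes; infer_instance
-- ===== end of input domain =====

-- B replaces A's unbounded order-of-2 loop (O(p) per prime) by a loop capped at 120
-- doublings plus an O(1) running count instead of re-summing the dict; measurably faster.

-- ===== PORT A =====

-- while val != 1: val = (val*2) % p; r += 1; if r > p: return p-1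
-- fuel only makes the recursion structural; the `r > p` guard bounds the loop by p
-- iterations, so fuel (p+2).toNat is never exhausted on the inputs A reaches (p ≥ 3).
def pvOrdLoopA (p : Int) (fuel : Nat) (val r : Int) : Int :=
  match fuel with
  | 0 => r
  | fuel + 1 =>
    if val = 1 then r
    else if r + 1 > p then p - 1
    else pvOrdLoopA p fuel (PySem.Int.mod (val * 2) p) (r + 1)

def ord_p_2 (p : Int) : Int := pvOrdLoopA p (p + 2).toNat (PySem.Int.mod 2 p) 1

-- while i*i <= n: if n % i == 0 or n % (i+2) == 0: return False; i += 6
-- fuel n.toNat is ample: i grows by 6 from 5 and the loop stops once i*i > n.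
def pvTrialA (n : Int) (fuel : Nat) (i : Int) : Bool :=
  match fuel with
  | 0 => true
  | fuel + 1 =>
    if i * i ≤ n then
      if PySem.Int.mod n i = 0 ∨ PySem.Int.mod n (i + 2) = 0 then false
      else pvTrialA n fuel (i + 6)
    else true

def is_primeA (n : Int) : Bool :=
  if n < 2 then false
  else if n < 4 then true
  else if PySem.Int.mod n 2 = 0 ∨ PySem.Int.mod n 3 = 0 then false
  else pvTrialA n n.toNat 5

-- sum(len(v) for v in primes_by_order.values())
def pvSumLens (d : PySem.Dict Int (List Int)) : Int :=
  ((d.values).map (fun v => PySem.List.len v)).sum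

-- the `for p in range(3, max_p, 2)` loop with `break`, consumed lazily like Python's range
-- fuel max_p.toNat only makes the recursion structural: the loop leaves once p ≥ max_p,
-- after at most (max_p-3)/2 + 1 < max_p.toNat steps, and an exhausted fuel returns the
-- same dict the guard would.
def pvGoA (max_p max_count : Int) (fuel : Nat) (p : Int) (d : PySem.Dict Int (List Int)) :
    PySem.Dict Int (List Int) :=
  match fuel with
  | 0 => d
  | fuel + 1 =>
    if p < max_p then
      if is_primeA p = true then
        let r := ord_p_2 p
        if 8 ≤ r ∧ r ≤ 120 then
          -- primes_by_order[r].append(p) on a defaultdict(list)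
          let d' := d.modify r [] (fun v => v ++ [p])
          if max_count ≤ pvSumLens d' then d' else pvGoA max_p max_count fuel (p + 2) d'
        else pvGoA max_p max_count fuel (p + 2) d
      else pvGoA max_p max_count fuel (p + 2) d
    else d

def find_good_primes (max_p : Int) (max_count : Int) : List (Int × List Int) :=
  (pvGoA max_p max_count max_p.toNat 3 PySem.Dict.empty).items

-- ===== PORT B =====

-- while d*d <= n: if n % d == 0: return False; d += 2
def pvTrialB (n : Int) (fuel : Nat) (d : Int) : Bool :=
  match fuel with
  | 0 => true
  | fuel + 1 =>
    if d * d ≤ n then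
      if PySem.Int.mod n d = 0 then false
      else pvTrialB n fuel (d + 2)
    else true

def is_primeB (n : Int) : Bool :=
  if n < 2 then false
  else if PySem.Int.mod n 2 = 0 then decide (n = 2)
  else pvTrialB n n.toNat 3

-- for r in range(1, 121): if val == 1: return r; val = val * 2 % p  / return None
def pvCapLoop (p val : Int) (rs : List Int) : Option Int :=
  match rs with
  | [] => none
  | r :: rest =>
    if val = 1 then some r
    else pvCapLoop p (PySem.Int.mod (val * 2) p) rest

def capped_ord2 (p : Int) : Option Int :=
  pvCapLoop p (PySem.Int.mod 2 p) (PySem.List.pyRange 1 121 1)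

def pvGoB (max_p max_count : Int) (fuel : Nat) (p : Int) (d : PySem.Dict Int (List Int))
    (count : Int) : PySem.Dict Int (List Int) :=
  match fuel with
  | 0 => d
  | fuel + 1 =>
    if p < max_p then
      if is_primeB p = true then
        match capped_ord2 p with
        | some r =>
          if 8 ≤ r then
            let d' := d.insert r (d.getD r [] ++ [p])
            let c' := count + 1
            if max_count ≤ c' then d' else pvGoB max_p max_count fuel (p + 2) d' c'
          else pvGoB max_p max_count fuel (p + 2) d count
        | none => pvGoB max_p max_count fuel (p + 2) d count
      else pvGoB max_p max_count fuel (p + 2) d count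
    else d

def find_good_primes_alt (max_p : Int) (max_count : Int) : List (Int × List Int) :=
  (pvGoB max_p max_count max_p.toNat 3 PySem.Dict.empty 0).items

-- ===== PRECONDITION & SPEC =====
def Spec_find_good_primes (max_p : Int) (max_count : Int) (out : List (Int × List Int)) : Prop := out = find_good_primes_alt max_p max_count
instance (max_p : Int) (max_count : Int) (out : List (Int × List Int)) : Decidable (Spec_find_good_primes max_p max_count out) := by unfold Spec_find_good_primes; infer_instance

-- ===== CLAIM (what is proved, stated in full; the proofs are below) =====
def Claim_equal_find_good_primes : Prop := ∀ (max_p : Int) (max_count : Int), Dom_find_good_primes max_p max_count → Spec_find_good_primes max_p max_count (find_good_primes max_p max_count)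

-- ===== LEMMAS AND PROOFS =====

-- "n has no divisor e with 2 ≤ e and e*e ≤ n" — the common specification of both trial loops
def pvNoDiv (n : Int) : Prop := ∀ e : Int, 2 ≤ e → e * e ≤ n → ¬ e ∣ n

theorem pv_le_of_sq_le (i n : Int) (h : i * i ≤ n) : i ≤ n := by
  rcases le_or_gt i 0 with hi | hi
  · have := mul_self_nonneg i; omega
  · nlinarith

theorem pv_lt_of_sq_lt (e d : Int) (he : 0 ≤ e) (hd : 0 ≤ d) (h : e * e < d * d) : e < d := by
  by_contra hc
  push Not at hc
  nlinarith

theorem pvTrialB_iff : ∀ (fuel : Nat) (n d : Int), 2 ≤ n → ¬ (2:Int) ∣ n → 3 ≤ d →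
    ¬ (2:Int) ∣ d → (n + 1 - d).toNat ≤ fuel →
    (∀ e : Int, 2 ≤ e → e < d → e * e ≤ n → ¬ e ∣ n) →
    (pvTrialB n fuel d = true ↔ pvNoDiv n) := by
  intro fuel
  induction fuel with
  | zero =>
    intro n d hn h2n hd3 _ hf Hb
    have hdn : n + 1 ≤ d := by omega
    have hguard : ¬ d * d ≤ n := by nlinarith
    simp only [pvTrialB, true_iff]
    intro e he1 he2
    exact Hb e he1 (pv_lt_of_sq_lt e d (by omega) (by omega) (by nlinarith)) he2
  | succ f ih =>
    intro n d hn h2n hd3 h2d hf Hb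
    by_cases hdd : d * d ≤ n
    · have hdn : d ≤ n := pv_le_of_sq_le d n hdd
      by_cases hm : PySem.Int.mod n d = 0
      · simp only [pvTrialB, if_pos hdd, if_pos hm, Bool.false_eq_true, false_iff]
        intro H
        exact H d (by omega) hdd ((PySem.Int.mod_eq_zero_iff_dvd n d).1 hm)
      · simp only [pvTrialB, if_pos hdd, if_neg hm]
        refine ih n (d + 2) hn h2n (by omega) (by omega) (by omega) ?_
        intro e he1 he2 he3
        rcases (by omega : e < d ∨ e = d ∨ e = d + 1) with h | h | h
        · exact Hb e he1 h he3
        · subst h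
          intro hdvd
          exact hm ((PySem.Int.mod_eq_zero_iff_dvd n e).2 hdvd)
        · subst h
          intro hdvd
          exact h2n (dvd_trans (by omega : (2:Int) ∣ d + 1) hdvd)
    · simp only [pvTrialB, if_neg hdd, true_iff]
      intro e he1 he2
      exact Hb e he1 (pv_lt_of_sq_lt e d (by omega) (by omega) (by nlinarith)) he2

theorem pvTrialA_iff : ∀ (fuel : Nat) (n i : Int), 2 ≤ n → ¬ (2:Int) ∣ n → ¬ (3:Int) ∣ n →
    5 ≤ i → i % 6 = 5 → (n + 1 - i).toNat ≤ fuel →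
    (∀ e : Int, 2 ≤ e → e < i → e * e ≤ n → ¬ e ∣ n) →
    (pvTrialA n fuel i = true ↔ pvNoDiv n) := by
  intro fuel
  induction fuel with
  | zero =>
    intro n i hn h2n h3n hi5 hi6 hf Hb
    have hin : n + 1 ≤ i := by omega
    have hguard : ¬ i * i ≤ n := by nlinarith
    simp only [pvTrialA, true_iff]
    intro e he1 he2
    exact Hb e he1 (pv_lt_of_sq_lt e i (by omega) (by omega) (by nlinarith)) he2
  | succ f ih =>
    intro n i hn h2n h3n hi5 hi6 hf Hb
    by_cases hii : i * i ≤ n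
    · have hin : i ≤ n := pv_le_of_sq_le i n hii
      by_cases hm : PySem.Int.mod n i = 0 ∨ PySem.Int.mod n (i + 2) = 0
      · simp only [pvTrialA, if_pos hii, if_pos hm, Bool.false_eq_true, false_iff]
        intro H
        rcases hm with hm | hm
        · exact H i (by omega) hii ((PySem.Int.mod_eq_zero_iff_dvd n i).1 hm)
        · -- n % (i+2) == 0: either i+2 itself or its cofactor is a small witness against pvNoDiv
          have hdvd : (i + 2) ∣ n := (PySem.Int.mod_eq_zero_iff_dvd n (i + 2)).1 hm
          by_cases hbig : (i + 2) * (i + 2) ≤ n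
          · exact H (i + 2) (by omega) hbig hdvd
          · push Not at hbig
            obtain ⟨c, hc⟩ := hdvd
            have hc2 : 2 ≤ c := by nlinarith
            have hcsq : c * c ≤ n := by nlinarith
            exact H c hc2 hcsq ⟨i + 2, by rw [hc, mul_comm]⟩
      · simp only [pvTrialA, if_pos hii, if_neg hm]
        push Not at hm
        refine ih n (i + 6) hn h2n h3n (by omega) (by omega) (by omega) ?_
        intro e he1 he2 he3
        rcases (by omega : e < i ∨ e = i ∨ e = i + 1 ∨ e = i + 2 ∨ e = i + 3 ∨ e = i + 4 ∨ e = i + 5)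
          with h | h | h | h | h | h | h
        · exact Hb e he1 h he3
        · subst h; intro hdvd; exact hm.1 ((PySem.Int.mod_eq_zero_iff_dvd n e).2 hdvd)
        · subst h; intro hdvd; exact h2n (dvd_trans (by omega : (2:Int) ∣ i + 1) hdvd)
        · subst h; intro hdvd; exact hm.2 ((PySem.Int.mod_eq_zero_iff_dvd n (i + 2)).2 hdvd)
        · subst h; intro hdvd; exact h2n (dvd_trans (by omega : (2:Int) ∣ i + 3) hdvd)
        · subst h; intro hdvd; exact h3n (dvd_trans (by omega : (3:Int) ∣ i + 4) hdvd)
        · subst h; intro hdvd; exact h2n (dvd_trans (by omega : (2:Int) ∣ i + 5) hdvd)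
    · simp only [pvTrialA, if_neg hii, true_iff]
      intro e he1 he2
      exact Hb e he1 (pv_lt_of_sq_lt e i (by omega) (by omega) (by nlinarith)) he2

theorem pv_prime_eq (n : Int) : is_primeA n = is_primeB n := by
  by_cases h2 : n < 2
  · simp [is_primeA, is_primeB, h2]
  push Not at h2
  by_cases hev : PySem.Int.mod n 2 = 0
  · have h2n : (2:Int) ∣ n := (PySem.Int.mod_eq_zero_iff_dvd n 2).1 hev
    by_cases h4 : n < 4
    · have : n = 2 := by omega
      subst this
      decide
    · have hne2 : ¬ (n = 2) := by omega
      simp only [is_primeA, is_primeB, if_neg (show ¬ n < 2 by omega), if_neg h4,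
        if_pos (Or.inl hev : PySem.Int.mod n 2 = 0 ∨ PySem.Int.mod n 3 = 0),
        if_pos hev, decide_eq_false hne2]
  · have h2n : ¬ (2:Int) ∣ n := fun h => hev ((PySem.Int.mod_eq_zero_iff_dvd n 2).2 h)
    by_cases h4 : n < 4
    · have : n = 3 := by omega
      subst this
      decide
    · push Not at h4
      by_cases h3 : PySem.Int.mod n 3 = 0
      · have h3n : (3:Int) ∣ n := (PySem.Int.mod_eq_zero_iff_dvd n 3).1 h3
        have h9 : 9 ≤ n := by omega
        have hB : ¬ (pvTrialB n n.toNat 3 = true) := by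
          rw [pvTrialB_iff n.toNat n 3 (by omega) h2n (by omega) (by omega) (by omega)
              (by intro e he1 he2 _ hd; interval_cases e; omega)]
          intro H
          exact H 3 (by omega) (by omega) h3n
        simp only [is_primeA, is_primeB, if_neg (show ¬ n < 2 by omega),
          if_neg (show ¬ n < 4 by omega),
          if_pos (Or.inr h3 : PySem.Int.mod n 2 = 0 ∨ PySem.Int.mod n 3 = 0), if_neg hev]
        exact (Bool.eq_false_iff.2 hB).symm
      · have h3n : ¬ (3:Int) ∣ n := fun h => h3 ((PySem.Int.mod_eq_zero_iff_dvd n 3).2 h)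
        have hA := pvTrialA_iff n.toNat n 5 (by omega) h2n h3n (by omega) (by omega)
          (by omega) (by
            intro e he1 he2 _ hd
            interval_cases e
            · omega
            · omega
            · exact h2n (dvd_trans (by omega) hd))
        have hB := pvTrialB_iff n.toNat n 3 (by omega) h2n (by omega) (by omega)
          (by omega) (by intro e he1 he2 _ hd; interval_cases e; omega)
        simp only [is_primeA, is_primeB, if_neg (show ¬ n < 2 by omega),
          if_neg (show ¬ n < 4 by omega),
          if_neg (show ¬ (PySem.Int.mod n 2 = 0 ∨ PySem.Int.mod n 3 = 0) by tauto),
          if_neg hev]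
        rw [Bool.eq_iff_iff, hA, hB]

theorem pvOrdLoopA_lb (p : Int) : ∀ (fuel : Nat) (val r : Int),
    r ≤ pvOrdLoopA p fuel val r ∨ pvOrdLoopA p fuel val r = p - 1 := by
  intro fuel
  induction fuel with
  | zero => intro val r; left; simp [pvOrdLoopA]
  | succ f ih =>
    intro val r
    simp only [pvOrdLoopA]
    split_ifs with h1 h2
    · left; omega
    · right; rfl
    · rcases ih (PySem.Int.mod (val * 2) p) (r + 1) with h | h
      · left; omega
      · right; exact h

theorem pvCapLoop_mem (p : Int) : ∀ (rs : List Int) (val s : Int),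
    pvCapLoop p val rs = some s → s ∈ rs := by
  intro rs
  induction rs with
  | nil => intro val s h; simp [pvCapLoop] at h
  | cons r rest ih =>
    intro val s h
    simp only [pvCapLoop] at h
    split_ifs at h with hv
    · simp at h; simp [h]
    · exact List.mem_cons_of_mem r (ih _ s h)

theorem pv_lockstep (p : Int) (hp : 122 ≤ p) : ∀ (fuel : Nat) (val r : Int),
    1 ≤ r → r ≤ 121 → (121 - r).toNat < fuel →
    (∀ s : Int, pvCapLoop p val (PySem.List.pyRange r 121 1) = some s →
        pvOrdLoopA p fuel val r = s) ∧
    (pvCapLoop p val (PySem.List.pyRange r 121 1) = none →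
        121 ≤ pvOrdLoopA p fuel val r ∨ pvOrdLoopA p fuel val r = p - 1) := by
  intro fuel
  induction fuel with
  | zero => intro val r _ _ hf; omega
  | succ f ih =>
    intro val r hr1 hr2 hf
    by_cases hr : r < 121
    · rw [PySem.List.pyRange_one_cons (by omega : r < (121:Int))]
      by_cases hv : val = 1
      · constructor
        · intro s hs
          simp only [pvCapLoop, if_pos hv, Option.some.injEq] at hs
          simp only [pvOrdLoopA, if_pos hv]
          omega
        · intro hs
          simp [pvCapLoop, hv] at hs
      · have hA : pvOrdLoopA p (f + 1) val r
            = pvOrdLoopA p f (PySem.Int.mod (val * 2) p) (r + 1) := by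
          simp only [pvOrdLoopA, if_neg hv, if_neg (show ¬ r + 1 > p by omega)]
        have hC : pvCapLoop p val (r :: PySem.List.pyRange (r + 1) 121 1)
            = pvCapLoop p (PySem.Int.mod (val * 2) p) (PySem.List.pyRange (r + 1) 121 1) := by
          simp only [pvCapLoop, if_neg hv]
        rw [hA, hC]
        exact ih (PySem.Int.mod (val * 2) p) (r + 1) (by omega) (by omega) (by omega)
    · have hr121 : r = 121 := by omega
      subst hr121
      rw [PySem.List.pyRange_one_eq_nil (by omega : (121:Int) ≤ 121)]
      constructor
      · intro s hs; simp [pvCapLoop] at hs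
      · intro _
        rcases pvOrdLoopA_lb p (f + 1) val 121 with h | h
        · left; omega
        · right; exact h

-- A's acceptance decision for a candidate p, and B's
def pvAccA (p : Int) : Option Int :=
  if 8 ≤ ord_p_2 p ∧ ord_p_2 p ≤ 120 then some (ord_p_2 p) else none

def pvAccB (p : Int) : Option Int :=
  match capped_ord2 p with
  | some r => if 8 ≤ r then some r else none
  | none => none

theorem pvAcc_eq_small : ∀ k : Nat, k < 60 →
    pvAccA (3 + 2 * (k : Int)) = pvAccB (3 + 2 * (k : Int)) := by
  decide

theorem pvAcc_eq (p : Int) (h3 : 3 ≤ p) (hodd : ¬ (2:Int) ∣ p) : pvAccA p = pvAccB p := by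
  by_cases hp : 122 ≤ p
  · have hl := pv_lockstep p hp (p + 2).toNat (PySem.Int.mod 2 p) 1 (by omega) (by omega)
      (by omega)
    cases hcap : pvCapLoop p (PySem.Int.mod 2 p) (PySem.List.pyRange 1 121 1) with
    | none =>
      have hord := hl.2 hcap
      have hno : ¬ (8 ≤ ord_p_2 p ∧ ord_p_2 p ≤ 120) := by unfold ord_p_2; omega
      simp [pvAccA, pvAccB, capped_ord2, hcap, hno]
    | some s =>
      have hord : ord_p_2 p = s := hl.1 s hcap
      have hmem := pvCapLoop_mem p _ _ s hcap
      rw [PySem.List.mem_pyRange_one] at hmem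
      by_cases h8 : 8 ≤ s
      · simp [pvAccA, pvAccB, capped_ord2, hcap, hord, h8, show s ≤ 120 by omega]
      · simp [pvAccA, pvAccB, capped_ord2, hcap, hord, h8]
  · obtain ⟨k, hk, hpk⟩ : ∃ k : Nat, k < 60 ∧ p = 3 + 2 * (k : Int) :=
      ⟨((p - 3) / 2).toNat, by omega, by omega⟩
    rw [hpk]
    exact pvAcc_eq_small k hk

theorem pvSumLens_map_replace (r : Int) (w : List Int) (p : Int) :
    ∀ l : List (Int × List Int), (l.map (fun q => q.1)).Nodup → (r, w) ∈ l →
    ((l.map (fun q => if q.1 == r then (r, w ++ [p]) else q)).map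
        (fun q => PySem.List.len q.2)).sum
      = (l.map (fun q => PySem.List.len q.2)).sum + 1 := by
  intro l
  induction l with
  | nil => intro _ hm; simp at hm
  | cons q l ih =>
    intro hnd hm
    simp only [List.map_cons, List.nodup_cons] at hnd ⊢
    rcases List.mem_cons.1 hm with hq | hq
    · have hq1 : q.1 = r := by rw [← hq]
      have htail : l.map (fun x => if x.1 == r then (r, w ++ [p]) else x) = l := by
        conv_rhs => rw [← List.map_id l]
        apply List.map_congr_left
        intro x hx
        have : x.1 ≠ r := by
          intro hxr
          exact hnd.1 (hq1 ▸ hxr ▸ List.mem_map_of_mem hx)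
        simp [this]
      rw [htail]
      have hq2 : q.2 = w := by rw [← hq]
      simp only [hq1, beq_self_eq_true, if_pos, List.sum_cons, hq2]
      have hlen : PySem.List.len (w ++ [p]) = PySem.List.len w + 1 := by
        simp [PySem.List.len]
      omega
    · have hq1 : q.1 ≠ r := by
        intro hxr
        exact hnd.1 (hxr ▸ List.mem_map_of_mem hq)
      rw [if_neg (by simpa using hq1)]
      simp only [List.sum_cons]
      rw [ih hnd.2 hq]
      omega

theorem pvSumLens_insert (d : PySem.Dict Int (List Int)) (r p : Int)
    (hnd : d.keys.Nodup) :
    pvSumLens (d.insert r (d.getD r [] ++ [p])) = pvSumLens d + 1 := by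
  have hv : ∀ e : PySem.Dict Int (List Int), e.values = e.items.map (fun q => q.2) :=
    fun _ => rfl
  by_cases hc : d.contains r
  · obtain ⟨w, hw⟩ : ∃ w, d.get? r = some w := by
      have h := PySem.Dict.contains_eq_isSome_get? d r
      rw [hc] at h
      exact Option.isSome_iff_exists.1 h.symm
    have hgd : d.getD r [] = w := PySem.Dict.getD_of_get?_eq_some d [] hw
    have hmem : (r, w) ∈ d.items := PySem.Dict.mem_items_of_get?_eq_some d hw
    unfold pvSumLens
    rw [hv, hv, PySem.Dict.items_insert_of_contains d _ hc, hgd]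
    simpa [List.map_map, Function.comp_def] using pvSumLens_map_replace r w p d.items hnd hmem
  · unfold pvSumLens
    rw [hv, hv, PySem.Dict.items_insert_of_not_contains d _ (by simpa using hc),
      PySem.Dict.getD_of_not_contains d [] (by simpa using hc)]
    simp [PySem.List.len]

theorem pvGo_eq (max_p max_count : Int) : ∀ (fuel : Nat) (p : Int)
    (d : PySem.Dict Int (List Int)) (count : Int),
    3 ≤ p → ¬ (2:Int) ∣ p → d.keys.Nodup → count = pvSumLens d →
    pvGoA max_p max_count fuel p d = pvGoB max_p max_count fuel p d count := by
  intro fuel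
  induction fuel with
  | zero => intro p d count _ _ _ _; rfl
  | succ f ih =>
    intro p d count h3 hodd hnd hcount
    simp only [pvGoA, pvGoB]
    by_cases hlt : p < max_p
    · have hIH : ∀ (d' : PySem.Dict Int (List Int)) (count' : Int), d'.keys.Nodup →
          count' = pvSumLens d' →
          pvGoA max_p max_count f (p + 2) d' = pvGoB max_p max_count f (p + 2) d' count' :=
        fun d' count' h1 h2 => ih (p + 2) d' count' (by omega) (by omega) h1 h2
      simp only [if_pos hlt, ← pv_prime_eq p]
      by_cases hpr : is_primeA p = true
      · simp only [if_pos hpr]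
        have hacc := pvAcc_eq p h3 hodd
        cases hc : capped_ord2 p with
        | none =>
          have h0 : pvAccA p = none := by rw [hacc]; simp [pvAccB, hc]
          have hA : ¬ (8 ≤ ord_p_2 p ∧ ord_p_2 p ≤ 120) := by
            intro hcond
            simp [pvAccA, hcond] at h0
          simp only [if_neg hA]
          exact hIH d count hnd hcount
        | some s =>
          by_cases h8 : 8 ≤ s
          · have hAcc : pvAccA p = some s := by rw [hacc]; simp [pvAccB, hc, h8]
            have hcond : (8 ≤ ord_p_2 p ∧ ord_p_2 p ≤ 120) ∧ ord_p_2 p = s := by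
              by_cases hcnd : 8 ≤ ord_p_2 p ∧ ord_p_2 p ≤ 120
              · refine ⟨hcnd, ?_⟩
                simpa [pvAccA, hcnd] using hAcc
              · simp [pvAccA, hcnd] at hAcc
            have hcondS : 8 ≤ s ∧ s ≤ 120 := hcond.2 ▸ hcond.1
            have hmodify : d.modify s [] (fun v => v ++ [p])
                = d.insert s (d.getD s [] ++ [p]) := rfl
            have hsum : pvSumLens (d.insert s (d.getD s [] ++ [p])) = pvSumLens d + 1 :=
              pvSumLens_insert d s p hnd
            simp only [hcond.2, hmodify, if_pos hcondS, if_pos h8]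
            rw [hsum, ← hcount]
            by_cases hbrk : max_count ≤ count + 1
            · simp only [if_pos hbrk]
            · simp only [if_neg hbrk]
              exact hIH _ _ (PySem.Dict.nodup_keys_insert d s _ hnd) (by rw [hsum, hcount])
          · have hAcc : pvAccA p = none := by rw [hacc]; simp [pvAccB, hc, h8]
            have hA : ¬ (8 ≤ ord_p_2 p ∧ ord_p_2 p ≤ 120) := by
              intro hcond
              simp [pvAccA, hcond] at hAcc
            simp only [if_neg hA, if_neg h8]
            exact hIH d count hnd hcount
      · simp only [if_neg hpr]
        exact hIH d count hnd hcount
    · simp only [if_neg hlt]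

-- ===== VERDICT (by name: the statement is the Claim_ definition above) =====
theorem find_good_primes_spec : Claim_equal_find_good_primes := by
  intro max_p max_count _
  unfold Spec_find_good_primes find_good_primes find_good_primes_alt
  congr 1
  exact pvGo_eq max_p max_count max_p.toNat 3 PySem.Dict.empty 0 (by omega)
    (by decide) PySem.Dict.nodup_keys_empty rfl
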